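-- pv_equiv track=rewrite | github.com/jaanit/Problem-solving | bootcamp-1337/Day04/C.py | solve
-- ===== SOURCE A (Python) =====
-- def solve(adj_matrix):
--     n = len(adj_matrix)
--     src = []
--     sinks = []
--     for i in range(n):
--         if sum(adj_matrix[i]) == 0:
--             src.append(i + 1)
--
--         if sum(row[i] for row in adj_matrix) == 0:
--             sinks.append(i + 1)
--     return src, sinks
-- ===== SOURCE B (Python) =====
-- def solve(adj_matrix):
--     n = len(adj_matrix)
--     col_sums = [0] * n
--     row_sums = []
--     for row in adj_matrix:
--         row_sums.append(sum(row))
--         for j in range(n):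
--             col_sums[j] += row[j]
--     src = [i + 1 for i in range(n) if row_sums[i] == 0]
--     sinks = [i + 1 for i in range(n) if col_sums[i] == 0]
--     return src, sinks
-- ===== Notes on version B (the rewrite author's own statement) =====
-- stated objective: alternative
-- what changed: B makes one pass over the matrix accumulating row sums and a column-sum table, then a single index loop over the tables, instead of re-scanning the whole matrix for each column index inside A's loop.
import Mathlib
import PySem

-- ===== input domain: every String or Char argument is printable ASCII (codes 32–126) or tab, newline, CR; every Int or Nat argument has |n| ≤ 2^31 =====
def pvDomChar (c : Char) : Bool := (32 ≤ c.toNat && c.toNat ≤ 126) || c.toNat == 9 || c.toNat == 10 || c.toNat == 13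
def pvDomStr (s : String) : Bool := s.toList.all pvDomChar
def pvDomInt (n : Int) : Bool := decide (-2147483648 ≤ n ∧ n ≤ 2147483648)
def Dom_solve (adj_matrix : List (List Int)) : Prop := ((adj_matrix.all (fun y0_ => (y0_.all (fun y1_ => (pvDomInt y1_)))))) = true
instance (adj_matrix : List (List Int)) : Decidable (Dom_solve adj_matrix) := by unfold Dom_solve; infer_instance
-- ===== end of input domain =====

-- B replaces A's per-index full-matrix column rescan by one accumulation pass building row sums
-- and a column-sum table, then a single index loop over those tables (alternative algorithm).


-- ===== PORT A =====
-- adj_matrix[i] and row[i] are ported with pyGetD; under Pre_solve every such index is in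
-- range, so this is exact there (Pre_solve excludes exactly the IndexError inputs).
def solve (adj_matrix : List (List Int)) : List Int × List Int :=
  let n : Int := adj_matrix.length
  (PySem.List.pyRange 0 n 1).foldl (fun (st : List Int × List Int) i =>
    let st1 := if (PySem.List.pyGetD adj_matrix i []).sum = 0 then (st.1 ++ [i + 1], st.2) else st
    if (adj_matrix.map (fun row => PySem.List.pyGetD row i 0)).sum = 0 then
      (st1.1, st1.2 ++ [i + 1])
    else st1) ([], [])

-- ===== PORT B =====
-- 'for j in range(n): col_sums[j] += row[j]' — the in-place update col_sums[j] += row[j] is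
-- ported by hand as List.set at j.toNat with pyGetD reads; exact for 0 ≤ j < n = |col_sums|,
-- which holds for every j range(n) yields (row[j] is exact under Pre_solve).
def solve_alt (adj_matrix : List (List Int)) : List Int × List Int :=
  let n := adj_matrix.length
  let st := adj_matrix.foldl
    (fun (st : List Int × List Int) row =>
      ((PySem.List.pyRange 0 (n : Int) 1).foldl
          (fun cs j => cs.set j.toNat (PySem.List.pyGetD cs j 0 + PySem.List.pyGetD row j 0)) st.1,
       st.2 ++ [row.sum]))
    (List.replicate n 0, [])
  ((PySem.List.pyRange 0 (n : Int) 1).filterMap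
      (fun i => if PySem.List.pyGetD st.2 i 0 = 0 then some (i + 1) else none),
   (PySem.List.pyRange 0 (n : Int) 1).filterMap
      (fun i => if PySem.List.pyGetD st.1 i 0 = 0 then some (i + 1) else none))

-- ===== PRECONDITION & SPEC =====
-- Pre_solve excludes exactly the ragged matrices on which A raises IndexError
-- (some row shorter than len(adj_matrix)); A returns on every other input.
def Pre_solve (adj_matrix : List (List Int)) : Prop :=
  ∀ row ∈ adj_matrix, adj_matrix.length ≤ row.length
instance (adj_matrix : List (List Int)) : Decidable (Pre_solve adj_matrix) := by
  unfold Pre_solve; infer_instance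
def pvWitness_solve : List (List Int) := [[0, 1], [0, 0]]

def Spec_solve (adj_matrix : List (List Int)) (out : List Int × List Int) : Prop :=
  out = solve_alt adj_matrix
instance (adj_matrix : List (List Int)) (out : List Int × List Int) :
    Decidable (Spec_solve adj_matrix out) := by unfold Spec_solve; infer_instance

-- ===== CLAIM (what is proved, stated in full; the proofs are below) =====
def Claim_equal_solve : Prop := ∀ (adj_matrix : List (List Int)), Dom_solve adj_matrix →
  Pre_solve adj_matrix → Spec_solve adj_matrix (solve adj_matrix)
-- ===== LEMMAS AND PROOFS =====

-- A's loop body with the two conditional appends, as filters.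
theorem foldl_two_appends (l : List Int) (p q : Int → Prop) [DecidablePred p] [DecidablePred q]
    (acc : List Int × List Int) :
    l.foldl (fun st i =>
        let st1 := if p i then (st.1 ++ [i + 1], st.2) else st
        if q i then (st1.1, st1.2 ++ [i + 1]) else st1) acc
      = (acc.1 ++ (l.filter (fun i => decide (p i))).map (· + 1),
         acc.2 ++ (l.filter (fun i => decide (q i))).map (· + 1)) := by
  induction l generalizing acc with
  | nil => simp
  | cons x t ih =>
    simp only [List.foldl_cons, List.filter_cons]
    by_cases hp : p x <;> by_cases hq : q x <;>
      simp [hp, hq, ih, List.append_assoc]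

theorem filterMap_if {α β : Type} (l : List α) (p : α → Prop) [DecidablePred p] (f : α → β) :
    l.filterMap (fun i => if p i then some (f i) else none)
      = (l.filter (fun i => decide (p i))).map f := by
  induction l with
  | nil => rfl
  | cons x t ih =>
    by_cases hp : p x <;> simp [hp, ih]

theorem inner_length (js cs row : List Int) :
    (js.foldl (fun cs j =>
        cs.set j.toNat (PySem.List.pyGetD cs j 0 + PySem.List.pyGetD row j 0)) cs).length
      = cs.length := by
  induction js generalizing cs with
  | nil => rfl
  | cons j t ih => simp [ih]

-- one execution of B's inner loop 'for j in range(m): col_sums[j] += row[j]'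
theorem inner_getD (row cs : List Int) (m : Nat) (hm : m ≤ cs.length) (k : Nat) :
    ((PySem.List.pyRange 0 (m : Int) 1).foldl (fun cs j =>
        cs.set j.toNat (PySem.List.pyGetD cs j 0 + PySem.List.pyGetD row j 0)) cs).getD k 0
      = cs.getD k 0 + (if k < m then row.getD k 0 else 0) := by
  induction m with
  | zero => simp [PySem.List.pyRange_one_eq_nil]
  | succ m ih =>
    have hcast : ((m + 1 : Nat) : Int) = (m : Int) + 1 := by push_cast; ring
    rw [hcast, PySem.List.pyRange_one_succ_right (by positivity), List.foldl_append]
    simp only [List.foldl_cons, List.foldl_nil]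
    set prev := (PySem.List.pyRange 0 (m : Int) 1).foldl (fun cs j =>
        cs.set j.toNat (PySem.List.pyGetD cs j 0 + PySem.List.pyGetD row j 0)) cs with hprev
    have hlen : prev.length = cs.length := inner_length _ _ _
    have hm' : m < prev.length := by omega
    rw [show ((m : Int)).toNat = m from Int.toNat_natCast m]
    by_cases hkm : k = m
    · subst hkm
      rw [List.getD_eq_getElem _ _ (by rwa [List.length_set]), List.getElem_set_self (by simpa using hm'),
          PySem.List.pyGetD_natCast, ih (by omega), if_neg (lt_irrefl k), if_pos (by omega)]
      simp [PySem.List.pyGetD_natCast]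
    · rw [List.getD, List.getD, List.getElem?_set_ne (by omega), ← List.getD, ← List.getD,
          ih (by omega)]
      by_cases hlt : k < m
      · rw [if_pos hlt, if_pos (by omega)]
      · rw [if_neg hlt, if_neg (by omega)]

-- second component of B's accumulation pass (the row sums)
theorem rowsums_eq (adj : List (List Int)) (n : Nat) (cs0 acc : List Int) :
    (adj.foldl (fun (st : List Int × List Int) row =>
        ((PySem.List.pyRange 0 (n : Int) 1).foldl (fun cs j =>
            cs.set j.toNat (PySem.List.pyGetD cs j 0 + PySem.List.pyGetD row j 0)) st.1,
         st.2 ++ [row.sum])) (cs0, acc)).2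
      = acc ++ adj.map List.sum := by
  induction adj generalizing cs0 acc with
  | nil => simp
  | cons r t ih => simp [ih, List.append_assoc]

-- invariant of B's accumulation pass, first component (the column-sum table)
theorem colsums_getD (adj : List (List Int)) (n : Nat) (cs0 acc : List Int)
    (hlen : cs0.length = n) (k : Nat) (hk : k < n) :
    ((adj.foldl (fun (st : List Int × List Int) row =>
        ((PySem.List.pyRange 0 (n : Int) 1).foldl (fun cs j =>
            cs.set j.toNat (PySem.List.pyGetD cs j 0 + PySem.List.pyGetD row j 0)) st.1,
         st.2 ++ [row.sum])) (cs0, acc)).1.getD k 0)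
      = cs0.getD k 0 + (adj.map (fun row => row.getD k 0)).sum := by
  induction adj generalizing cs0 acc with
  | nil => simp
  | cons r t ih =>
    simp only [List.foldl_cons, List.map_cons, List.sum_cons]
    rw [ih _ _ (by rw [inner_length, hlen]), inner_getD _ _ _ (by omega), if_pos hk]
    ring

-- ===== VERDICT (by name: the statement is the Claim_ definition above) =====
theorem solve_spec : Claim_equal_solve := by
  intro adj _ hpre
  unfold Spec_solve solve solve_alt
  simp only
  rw [foldl_two_appends, rowsums_eq, filterMap_if, filterMap_if]
  
  refine Prod.ext ?_ ?_ <;> simp only [List.nil_append]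
  · congr 1
    apply List.filter_congr
    intro i hi
    rcases (PySem.List.mem_pyRange_one).1 hi with ⟨h0, hn⟩
    obtain ⟨k, rfl⟩ : ∃ k : Nat, i = (k : Int) := ⟨i.toNat, (Int.toNat_of_nonneg h0).symm⟩
    have hk : k < adj.length := by exact_mod_cast hn
    have h1 : adj[k]? = some adj[k] := List.getElem?_eq_getElem hk
    have hk' : k < (adj.map List.sum).length := by simpa using hk
    have h2 : (adj.map List.sum)[k]? = some ((adj.map List.sum)[k]'hk') :=
      List.getElem?_eq_getElem hk'
    simp [PySem.List.pyGetD_natCast, List.getD, h1, h2]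
  · congr 1
    apply List.filter_congr
    intro i hi
    rcases (PySem.List.mem_pyRange_one).1 hi with ⟨h0, hn⟩
    obtain ⟨k, rfl⟩ : ∃ k : Nat, i = (k : Int) := ⟨i.toNat, (Int.toNat_of_nonneg h0).symm⟩
    have hk : k < adj.length := by exact_mod_cast hn
    rw [PySem.List.pyGetD_natCast, colsums_getD _ _ _ _ (by simp) k hk]
    have hz : (List.replicate adj.length (0 : Int)).getD k 0 = 0 := by simp [List.getD]
    rw [hz, zero_add]
    have hmap : adj.map (fun row => PySem.List.pyGetD row ((k : Int)) 0)
        = adj.map (fun row => row.getD k 0) := by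
      apply List.map_congr_left
      intro row hrow
      rw [PySem.List.pyGetD_natCast]
    rw [hmap]
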